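-- pv_equiv track=rewrite | github.com/RazLandau/Various-PYTHON-Projects | Miscellaneous.py | sort_pairs
-- ===== SOURCE A (Python) =====
-- def sort_pairs(lst):
--     ''' Sorts list of tuples of ints from 0-100 in O(n)'''
--     result = []
--     for i in range (0,100):
--         for j in range (0,100):
--             for item in lst:
--                 if (item[0] == i and item[1] == j):
--                     result.append(item)
--     return result
-- ===== SOURCE B (Python) =====
-- def sort_pairs(lst):
--     ''' Counting sort: one pass tallies in-range pairs into a dict, then emit in key order.'''
--     counts = {}
--     for item in lst:
--         if 0 <= item[0] < 100 and 0 <= item[1] < 100: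
--             counts[item] = counts.get(item, 0) + 1
--     result = []
--     for i in range(100):
--         for j in range(100):
--             result += [(i, j)] * counts.get((i, j), 0)
--     return result
-- ===== Notes on version B (the rewrite author's own statement) =====
-- stated objective: faster
-- what changed: Replaced the per-(i,j) rescans of the whole list (10000 scans) by a counting sort: one pass tallies in-range pairs into a dict, then the (i,j) emission loop replicates each pair from its count instead of scanning the list.
import Mathlib
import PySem

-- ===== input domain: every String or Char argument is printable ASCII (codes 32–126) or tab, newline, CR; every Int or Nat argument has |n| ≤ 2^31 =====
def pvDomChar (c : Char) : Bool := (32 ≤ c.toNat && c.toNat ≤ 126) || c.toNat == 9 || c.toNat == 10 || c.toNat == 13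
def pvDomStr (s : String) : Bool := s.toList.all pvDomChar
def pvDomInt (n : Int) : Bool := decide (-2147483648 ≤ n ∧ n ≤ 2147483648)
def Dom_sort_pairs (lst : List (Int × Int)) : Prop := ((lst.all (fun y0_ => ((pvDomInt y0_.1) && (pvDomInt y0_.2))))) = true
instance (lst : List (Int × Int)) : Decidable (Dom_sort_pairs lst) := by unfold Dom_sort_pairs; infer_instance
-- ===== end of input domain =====

-- B replaces A's 10000 rescans of the list with one counting pass into a dict plus an emission loop (counting sort); same return value, proved equal.
-- ===== PORT A =====
def sort_pairs (lst : List (Int × Int)) : List (Int × Int) :=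
  (PySem.List.pyRange 0 100 1).foldl (fun result i =>
    (PySem.List.pyRange 0 100 1).foldl (fun result j =>
      lst.foldl (fun result item =>
        if item.1 == i && item.2 == j then result ++ [item] else result) result) result) []

-- ===== PORT B =====
-- Python's `[(i, j)] * c` for an int c is List.replicate c.toNat (negative c gives []), exact here.
def sort_pairs_alt (lst : List (Int × Int)) : List (Int × Int) :=
  let counts : PySem.Dict (Int × Int) Int := lst.foldl (fun d item =>
      if 0 ≤ item.1 ∧ item.1 < 100 ∧ 0 ≤ item.2 ∧ item.2 < 100 then
        d.insert item (d.getD item 0 + 1)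
      else d) PySem.Dict.empty
  (PySem.List.pyRange 0 100 1).foldl (fun result i =>
    (PySem.List.pyRange 0 100 1).foldl (fun result j =>
      result ++ List.replicate (counts.getD (i, j) 0).toNat (i, j)) result) []

-- ===== PRECONDITION & SPEC =====
def Spec_sort_pairs (lst : List (Int × Int)) (out : List (Int × Int)) : Prop := out = sort_pairs_alt lst
instance (lst : List (Int × Int)) (out : List (Int × Int)) : Decidable (Spec_sort_pairs lst out) := by unfold Spec_sort_pairs; infer_instance

-- ===== CLAIM (what is proved, stated in full; the proofs are below) =====
def Claim_equal_sort_pairs : Prop := ∀ (lst : List (Int × Int)), Dom_sort_pairs lst → Spec_sort_pairs lst (sort_pairs lst)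

-- ===== LEMMAS AND PROOFS =====

-- the counting pass: for an in-range pair v, the tally is the count of v in lst
lemma getD_countsFold (l : List (Int × Int)) (d : PySem.Dict (Int × Int) Int) (v : Int × Int)
    (hv : 0 ≤ v.1 ∧ v.1 < 100 ∧ 0 ≤ v.2 ∧ v.2 < 100) :
    (l.foldl (fun d item =>
      if 0 ≤ item.1 ∧ item.1 < 100 ∧ 0 ≤ item.2 ∧ item.2 < 100 then
        d.insert item (d.getD item 0 + 1)
      else d) d).getD v 0 = d.getD v 0 + l.count v := by
  induction l generalizing d with
  | nil => simp
  | cons x t ih =>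
    simp only [List.foldl_cons, List.count_cons, ih]
    by_cases hx : 0 ≤ x.1 ∧ x.1 < 100 ∧ 0 ≤ x.2 ∧ x.2 < 100
    · rw [if_pos hx, PySem.Dict.getD_insert]
      by_cases hvx : v = x
      · subst hvx; simp only [BEq.rfl, if_pos]
        push_cast; ring
      · rw [if_neg hvx]
        have hb : (x == v) = false := beq_eq_false_iff_ne.2 (fun h => hvx h.symm)
        simp [hb]
    · rw [if_neg hx]
      have hb : (x == v) = false := beq_eq_false_iff_ne.2 (by rintro rfl; exact hx hv)
      simp [hb]

lemma A_flat (lst : List (Int × Int)) :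
    sort_pairs lst = (PySem.List.pyRange 0 100 1).flatMap (fun i =>
      (PySem.List.pyRange 0 100 1).flatMap (fun j =>
        lst.filter (fun it => it.1 == i && it.2 == j))) := by
  unfold sort_pairs
  simp only [PySem.List.foldl_append_if_eq_filter, PySem.List.foldl_append_eq_flatMap]
  simp

lemma B_flat (lst : List (Int × Int)) :
    sort_pairs_alt lst = (PySem.List.pyRange 0 100 1).flatMap (fun i =>
      (PySem.List.pyRange 0 100 1).flatMap (fun j =>
        List.replicate (lst.count (i, j)) (i, j))) := by
  unfold sort_pairs_alt
  simp only [PySem.List.foldl_append_eq_flatMap, List.nil_append]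
  apply List.flatMap_congr
  intro i hi
  apply List.flatMap_congr
  intro j hj
  rw [PySem.List.mem_pyRange_one] at hi hj
  rw [getD_countsFold lst PySem.Dict.empty (i, j) ⟨hi.1, hi.2, hj.1, hj.2⟩]
  simp


-- ===== VERDICT (by name: the statement is the Claim_ definition above) =====
theorem sort_pairs_spec : Claim_equal_sort_pairs := by
  intro lst _
  unfold Spec_sort_pairs
  rw [A_flat, B_flat]
  apply List.flatMap_congr; intro i _
  apply List.flatMap_congr; intro j _
  rw [← List.filter_beq]
  apply List.filter_congr
  intro it _
  obtain ⟨a, b⟩ := it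
  rfl
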